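-- pv_equiv track=rewrite | github.com/honeyhiveai/python-sdk | .agent-os/mcp_servers/workflow_engine.py | _extract_field_name
-- ===== SOURCE A (Python) =====
-- def _extract_field_name(line: str) -> str:
--     """Extract field name from requirement line.
--
--     Looks for field names in common formats like `field_name` or
--     **field_name** or snake_case words.
--
--     :param line: Line with potential field name
--     :type line: str
--     :return: Extracted field name or "unknown_field" if not found
--     :rtype: str
--     """
--     # Look for field name patterns (typically in code formatting or bold)
--     words = line.split()
--     for word in words:
--         # Field names often in code format: `field_name`
--         if word.startswith("`") and word.endswith("`"):
--             return word.strip("`")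
--         # Or emphasized: **field_name**
--         if word.startswith("**") and word.endswith("**"):
--             return word.strip("*").lower().replace(" ", "_")
--
--     # Fallback: first snake_case word
--     for word in words:
--         if "_" in word and word.replace("_", "").replace("-", "").isalnum():
--             return word.strip(":`\"'")
--
--     return "unknown_field"
-- ===== SOURCE B (Python) =====
-- def _classify(word):
--     """Tag a word with a priority: (0, value) for code/bold, (1, value) for snake_case."""
--     if word.startswith("`") and word.endswith("`"):
--         return (0, word.strip("`"))
--     if word.startswith("**") and word.endswith("**"):
--         return (0, word.strip("*").lower().replace(" ", "_"))
--     if "_" in word and word.replace("_", "").replace("-", "").isalnum():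
--         return (1, word.strip(":`\"'"))
--     return None
--
--
-- def _extract_field_name(line: str) -> str:
--     """Right-to-left fold: keep the best (priority, value) pair seen so far;
--     a candidate overwrites the current best when its priority is <= the best's,
--     so the leftmost code/bold word wins, else the leftmost snake_case word."""
--     best = (2, "unknown_field")
--     for word in reversed(line.split()):
--         c = _classify(word)
--         if c is not None and c[0] <= best[0]:
--             best = c
--     return best[1]
-- ===== Notes on version B (the rewrite author's own statement) =====
-- stated objective: alternative
-- what changed: Replaces A's two sequential early-return scans with a classifier that tags each word with a (priority, value) pair and a right-to-left fold keeping the best pair (priority <= best overwrites), so the leftmost code/bold word wins, else the leftmost snake_case word.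
import Mathlib
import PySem

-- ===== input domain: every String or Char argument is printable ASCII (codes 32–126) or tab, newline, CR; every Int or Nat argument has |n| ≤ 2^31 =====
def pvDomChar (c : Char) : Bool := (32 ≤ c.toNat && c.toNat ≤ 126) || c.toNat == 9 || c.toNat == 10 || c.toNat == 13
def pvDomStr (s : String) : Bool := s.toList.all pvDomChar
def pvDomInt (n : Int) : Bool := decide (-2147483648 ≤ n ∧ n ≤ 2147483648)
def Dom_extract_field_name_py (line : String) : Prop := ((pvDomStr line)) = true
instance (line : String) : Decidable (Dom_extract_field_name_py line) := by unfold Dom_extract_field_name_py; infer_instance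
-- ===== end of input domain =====

-- B replaces A's two early-return scans with a word classifier producing (priority, value)
-- pairs and a right-to-left fold keeping the best pair (objective: alternative decomposition).

-- ===== PORT A =====
-- first loop of A: return the first code- or bold-formatted word's field name
def pvA_loop1 : List String → Option String
  | [] => none
  | w :: ws =>
    if PySem.Str.startswith w "`" && PySem.Str.endswith w "`" then
      some (PySem.Str.stripChars w "`")
    else if PySem.Str.startswith w "**" && PySem.Str.endswith w "**" then
      some (PySem.Str.replace (PySem.Str.lower (PySem.Str.stripChars w "*")) " " "_")
    else pvA_loop1 ws

-- second loop of A: first snake_case word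
def pvA_loop2 : List String → Option String
  | [] => none
  | w :: ws =>
    if PySem.Str.isIn "_" w &&
       PySem.Str.strIsalnum (PySem.Str.replace (PySem.Str.replace w "_" "") "-" "") then
      some (PySem.Str.stripChars w ":`\"'")
    else pvA_loop2 ws

def extract_field_name_py (line : String) : String :=
  let words := PySem.Str.split₀ line
  match pvA_loop1 words with
  | some r => r
  | none =>
    match pvA_loop2 words with
    | some r => r
    | none => "unknown_field"

-- ===== PORT B =====
-- B's classifier: tag a word with its priority and extracted value
def pvClassify (w : String) : Option (Int × String) :=
  if PySem.Str.startswith w "`" && PySem.Str.endswith w "`" then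
    some (0, PySem.Str.stripChars w "`")
  else if PySem.Str.startswith w "**" && PySem.Str.endswith w "**" then
    some (0, PySem.Str.replace (PySem.Str.lower (PySem.Str.stripChars w "*")) " " "_")
  else if PySem.Str.isIn "_" w &&
       PySem.Str.strIsalnum (PySem.Str.replace (PySem.Str.replace w "_" "") "-" "") then
    some (1, PySem.Str.stripChars w ":`\"'")
  else none

-- B's fold step: a classified word overwrites the best when its priority is ≤
def pvStep (best : Int × String) (w : String) : Int × String :=
  match pvClassify w with
  | some c => if c.1 ≤ best.1 then c else best
  | none => best

def extract_field_name_py_alt (line : String) : String :=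
  ((PySem.Str.split₀ line).reverse.foldl pvStep (2, "unknown_field")).2

-- ===== PRECONDITION & SPEC =====
def Spec_extract_field_name_py (line : String) (out : String) : Prop := out = extract_field_name_py_alt line
instance (line : String) (out : String) : Decidable (Spec_extract_field_name_py line out) := by unfold Spec_extract_field_name_py; infer_instance

-- ===== CLAIM (what is proved, stated in full; the proofs are below) =====
def Claim_equal_extract_field_name_py : Prop := ∀ (line : String), Dom_extract_field_name_py line → Spec_extract_field_name_py line (extract_field_name_py line)

-- ===== LEMMAS AND PROOFS =====

-- invariant: the right-to-left fold (as a foldr) computes A's first code/bold word with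
-- priority 0, else A's first snake word with priority 1, else the initial sentinel
theorem pvFoldr_eq (ws : List String) :
    ws.foldr (fun w b => pvStep b w) ((2 : Int), "unknown_field") =
      (match pvA_loop1 ws with
       | some r => ((0 : Int), r)
       | none =>
         match pvA_loop2 ws with
         | some r => ((1 : Int), r)
         | none => ((2 : Int), "unknown_field")) := by
  induction ws with
  | nil => simp [pvA_loop1, pvA_loop2]
  | cons w ws ih =>
    rw [List.foldr_cons, ih]
    cases h1 : pvA_loop1 ws <;> cases h2 : pvA_loop2 ws <;>
      simp only [pvStep, pvClassify, pvA_loop1, pvA_loop2, h1, h2] <;>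
      split_ifs <;> simp_all

-- ===== VERDICT (by name: the statement is the Claim_ definition above) =====
theorem extract_field_name_py_spec : Claim_equal_extract_field_name_py := by
  intro line _
  unfold Spec_extract_field_name_py extract_field_name_py extract_field_name_py_alt
  rw [List.foldl_reverse, pvFoldr_eq]
  cases h1 : pvA_loop1 (PySem.Str.split₀ line) <;>
    cases h2 : pvA_loop2 (PySem.Str.split₀ line) <;> simp [h1, h2]
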